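-- pv_equiv track=rewrite | github.com/Jf-JIN/Pyinstaller-GUI | python-script/system/Loader_Pyinstaller_Struct.py | __get_next_param
-- ===== SOURCE A (Python) =====
-- def __get_next_param(cmd_data: list) -> str:
--     """
--     获取下个参数, 针对带有双引号的参数, 如:  "C:/test folder with space/test.py"
--     """
--     if len(cmd_data) == 0:
--         return ''
--     param: str = cmd_data.pop(0)
--     flag_stop = False
--     if param.startswith('"') or '="' in param:
--         param_list = [param]
--         if not param.endswith('"'):
--             while len(cmd_data) > 0:
--                 if cmd_data[0].endswith('"'):
--                     flag_stop = True
--                 temp_param = cmd_data.pop(0)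
--                 param_list.append(temp_param)
--                 if flag_stop:
--                     break
--         param = ' '.join(param_list)
--     return param
-- ===== SOURCE B (Python) =====
-- def __get_next_param(cmd_data: list) -> str:
--     """
--     获取下个参数, 针对带有双引号的参数, 如:  "C:/test folder with space/test.py"
--     """
--     if len(cmd_data) == 0:
--         return ''
--     first = cmd_data[0]
--     if not (first.startswith('"') or '="' in first) or first.endswith('"'):
--         del cmd_data[:1]
--         return first
--     # find the first remaining token that closes the quote; default: take everything
--     count = len(cmd_data)
--     for i, tok in enumerate(cmd_data[1:], start=1):
--         if tok.endswith('"'):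
--             count = i + 1
--             break
--     param = ' '.join(cmd_data[:count])
--     del cmd_data[:count]
--     return param
-- ===== Notes on version B (the rewrite author's own statement) =====
-- stated objective: alternative
-- what changed: Replaces A's one-at-a-time pop/flag while-loop with a boundary search (first remaining token ending in '"'), then builds the parameter by joining a single slice and consuming it with one bulk del.
import Mathlib
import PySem

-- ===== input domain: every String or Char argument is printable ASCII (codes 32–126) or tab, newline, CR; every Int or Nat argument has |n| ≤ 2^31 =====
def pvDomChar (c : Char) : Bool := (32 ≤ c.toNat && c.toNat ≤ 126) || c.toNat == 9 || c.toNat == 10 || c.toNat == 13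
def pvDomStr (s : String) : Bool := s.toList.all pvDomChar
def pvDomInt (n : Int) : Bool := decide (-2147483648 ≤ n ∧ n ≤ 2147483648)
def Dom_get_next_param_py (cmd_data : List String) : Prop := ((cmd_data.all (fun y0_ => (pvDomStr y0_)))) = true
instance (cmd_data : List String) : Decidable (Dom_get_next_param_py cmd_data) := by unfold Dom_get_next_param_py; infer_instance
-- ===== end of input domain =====

-- B replaces A's one-token-at-a-time pop/flag while-loop with a boundary search followed by one bulk slice;
-- both Pythons mutate cmd_data identically (remove the consumed prefix); the Lean claim is about the return value.

-- ===== PORT A =====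
-- A's while-loop: pop tokens into param_list until one ends with '"' (inclusive) or the list empties.
def pyLoopA : List String → List String → List String
  | [], acc => acc
  | t :: rest, acc =>
    if PySem.Str.endswith t "\"" then acc ++ [t]
    else pyLoopA rest (acc ++ [t])

def get_next_param_py (cmd_data : List String) : String :=
  match cmd_data with
  | [] => ""
  | param :: rest =>
    if PySem.Str.startswith param "\"" || PySem.Str.isIn "=\"" param then
      if !PySem.Str.endswith param "\"" then
        PySem.Str.join " " (pyLoopA rest [param])
      else
        PySem.Str.join " " [param]
    else param

-- ===== PORT B =====
def get_next_param_py_alt (cmd_data : List String) : String :=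
  match cmd_data with
  | [] => ""
  | first :: rest =>
    if !(PySem.Str.startswith first "\"" || PySem.Str.isIn "=\"" first)
        || PySem.Str.endswith first "\"" then first
    else
      let count : Nat :=
        match rest.findIdx? (fun t => PySem.Str.endswith t "\"") with
        | some i => i + 2           -- token i+1 of cmd_data closes the quote
        | none => rest.length + 1   -- no closing quote: take everything
      PySem.Str.join " " ((first :: rest).take count)

-- ===== PRECONDITION & SPEC =====
def Spec_get_next_param_py (cmd_data : List String) (out : String) : Prop := out = get_next_param_py_alt cmd_data
instance (cmd_data : List String) (out : String) : Decidable (Spec_get_next_param_py cmd_data out) := by unfold Spec_get_next_param_py; infer_instance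

-- ===== CLAIM (what is proved, stated in full; the proofs are below) =====
def Claim_equal_get_next_param_py : Prop := ∀ (cmd_data : List String), Dom_get_next_param_py cmd_data → Spec_get_next_param_py cmd_data (get_next_param_py cmd_data)

-- ===== LEMMAS AND PROOFS =====

-- A's loop returns acc followed by the prefix of rest up to (and including) the first closing token.
theorem pyLoopA_eq (rest acc : List String) :
    pyLoopA rest acc =
      acc ++ (match rest.findIdx? (fun t => PySem.Str.endswith t "\"") with
              | some i => rest.take (i + 1)
              | none => rest) := by
  induction rest generalizing acc with
  | nil => simp [pyLoopA]
  | cons t rest ih =>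
    cases h : PySem.Str.endswith t "\"" with
    | true =>
      simp only [pyLoopA, h, if_true, List.findIdx?_cons]
      simp
    | false =>
      simp only [pyLoopA, h, Bool.false_eq_true, if_false, ih, List.findIdx?_cons]
      cases hf : rest.findIdx? (fun t => PySem.Str.endswith t "\"") with
      | none => simp
      | some i => simp [List.take_succ_cons]

theorem join_singleton_str (sep s : String) : PySem.Str.join sep [s] = s := by
  simp [PySem.Str.join, PySem.Chars.join_singleton]

-- ===== VERDICT (by name: the statement is the Claim_ definition above) =====
theorem get_next_param_py_spec : Claim_equal_get_next_param_py := by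
  intro cmd_data _
  unfold Spec_get_next_param_py get_next_param_py get_next_param_py_alt
  match cmd_data with
  | [] => rfl
  | first :: rest =>
    cases hq : (PySem.Str.startswith first "\"" || PySem.Str.isIn "=\"" first) with
    | false => simp only [hq, Bool.false_eq_true, if_false, Bool.not_false, Bool.true_or, if_true]
    | true =>
      cases he : PySem.Str.endswith first "\"" with
      | true =>
        simp only [hq, he, if_true, Bool.not_true, Bool.false_or, Bool.false_eq_true, if_false,
          join_singleton_str]
      | false =>
        simp only [hq, he, if_true, Bool.not_true, Bool.not_false, Bool.false_or,
          Bool.false_eq_true, if_false, pyLoopA_eq]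
        cases hf : rest.findIdx? (fun t => PySem.Str.endswith t "\"") with
        | none => simp [List.take_of_length_le]
        | some i => simp [List.take_succ_cons]
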